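-- pv_equiv track=rewrite | github.com/lalaamy/ssafy-git | python/1684.py | rental_books
-- ===== SOURCE A (Python) =====
-- def rental_books(age, name, number_of_book):
--     rental_lst = []
--     remain_lst = []
--     for a in age:
--         book = a//10  #권수 세기
--         number_of_book -= book
--         rental_lst.append(book)
--         remain_lst.append(number_of_book)
--     return remain_lst, rental_lst
-- ===== SOURCE B (Python) =====
-- def rental_books(age, name, number_of_book):
--     rental_lst = [a // 10 for a in age]
--     prefix = []
--     total = 0
--     for b in rental_lst:
--         total += b
--         prefix.append(total)
--     remain_lst = [number_of_book - p for p in prefix]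
--     return remain_lst, rental_lst
-- ===== Notes on version B (the rewrite author's own statement) =====
-- stated objective: alternative
-- what changed: Replaces A's single loop with a mutating running subtraction by three separate passes: map a//10, a prefix-sum pass, and a map subtracting each prefix sum from number_of_book.
import Mathlib
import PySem

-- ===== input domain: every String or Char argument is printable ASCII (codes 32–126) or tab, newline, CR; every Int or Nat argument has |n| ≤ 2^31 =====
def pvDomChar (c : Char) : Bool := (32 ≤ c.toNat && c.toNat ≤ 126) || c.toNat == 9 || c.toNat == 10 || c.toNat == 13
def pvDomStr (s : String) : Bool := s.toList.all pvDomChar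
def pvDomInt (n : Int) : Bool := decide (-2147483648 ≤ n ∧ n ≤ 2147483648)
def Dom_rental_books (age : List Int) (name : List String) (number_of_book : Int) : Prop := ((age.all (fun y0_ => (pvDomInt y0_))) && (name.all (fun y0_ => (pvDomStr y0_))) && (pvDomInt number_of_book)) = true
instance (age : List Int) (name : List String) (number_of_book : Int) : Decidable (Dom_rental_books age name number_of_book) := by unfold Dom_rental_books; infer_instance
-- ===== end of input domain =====

-- B replaces A's single running-subtraction loop by three passes (map a//10, prefix sums, map nb - prefix); same cost, different decomposition.

-- ===== PORT A =====
-- A's loop: structural recursion carrying number_of_book, building rental and remain in order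
def pvGoA (l : List Int) (nb : Int) : List Int × List Int :=
  match l with
  | [] => ([], [])
  | a :: rest =>
      let book := PySem.Int.floordiv a 10
      let nb' := nb - book
      let (r, m) := pvGoA rest nb'
      (book :: r, nb' :: m)

def rental_books (age : List Int) (name : List String) (number_of_book : Int) : List Int × List Int :=
  let (rental_lst, remain_lst) := pvGoA age number_of_book
  (remain_lst, rental_lst)

-- ===== PORT B =====
-- the prefix-sum pass of Source B (running total as accumulator)
def pvPrefix (l : List Int) (total : Int) : List Int :=
  match l with
  | [] => []
  | b :: rest => (total + b) :: pvPrefix rest (total + b)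

def rental_books_alt (age : List Int) (name : List String) (number_of_book : Int) : List Int × List Int :=
  let rental_lst := age.map (fun a => PySem.Int.floordiv a 10)
  let pref := pvPrefix rental_lst 0
  let remain_lst := pref.map (fun p => number_of_book - p)
  (remain_lst, rental_lst)

-- ===== PRECONDITION & SPEC =====
def Spec_rental_books (age : List Int) (name : List String) (number_of_book : Int) (out : List Int × List Int) : Prop := out = rental_books_alt age name number_of_book
instance (age : List Int) (name : List String) (number_of_book : Int) (out : List Int × List Int) : Decidable (Spec_rental_books age name number_of_book out) := by unfold Spec_rental_books; infer_instance

-- ===== CLAIM (what is proved, stated in full; the proofs are below) =====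
def Claim_equal_rental_books : Prop := ∀ (age : List Int) (name : List String) (number_of_book : Int), Dom_rental_books age name number_of_book → Spec_rental_books age name number_of_book (rental_books age name number_of_book)

-- ===== LEMMAS AND PROOFS =====
theorem pvGoA_eq (l : List Int) (nb t : Int) :
    pvGoA l (nb - t) =
      (l.map (fun a => PySem.Int.floordiv a 10),
       (pvPrefix (l.map (fun a => PySem.Int.floordiv a 10)) t).map (fun p => nb - p)) := by
  induction l generalizing t with
  | nil => simp [pvGoA, pvPrefix]
  | cons a rest ih =>
      have h : nb - t - PySem.Int.floordiv a 10 = nb - (t + PySem.Int.floordiv a 10) := by ring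
      simp only [pvGoA, List.map, pvPrefix, h, ih (t + PySem.Int.floordiv a 10)]

-- ===== VERDICT (by name: the statement is the Claim_ definition above) =====
theorem rental_books_spec : Claim_equal_rental_books := by
  intro age name nb _
  show _ = _
  have := pvGoA_eq age nb 0
  simp only [sub_zero] at this
  simp [rental_books, rental_books_alt, this]
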